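-- pv_equiv track=rewrite | github.com/hdhd-tech/ClothPartField | scripts/plyAnnotate/run.py | merge_stitch_elements
-- ===== SOURCE A (Python) =====
-- def merge_stitch_elements(input_set: set) -> set:
--     """
--     将输入集合中所有以 'stitch_' 开头的元素合并为一个新的元素 'all_stitches'。
--
--     Args:
--         input_set (set): 包含字符串元素的原始集合。
--
--     Returns:
--         set: 合并后的新集合。
--     """
--     new_set = set()
--     stitch_elements_present = False # 标志位，看是否有stitch_开头的元素
--
--     for item in input_set:
--         if item.startswith('stitch_'):
--             stitch_elements_present = True
--         else:
--             new_set.add(item)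
--
--     if stitch_elements_present:
--         new_set.add('all_stitches') # 如果存在stitch_开头的元素，则添加合并后的标识
--
--     return new_set
-- ===== SOURCE B (Python) =====
-- def merge_stitch_elements(input_set: set) -> set:
--     # Divide-and-conquer: recursively split the element list in halves, each call
--     # returning (kept non-stitch elements, whether any stitch element was seen),
--     # then combine by concatenation / disjunction.  No mutable accumulator, no flag
--     # threaded through a loop; O(log n) recursion depth.
--     def merge(seq):
--         if len(seq) == 0:
--             return [], False
--         if len(seq) == 1:
--             x = seq[0]
--             if x.startswith('stitch_'):
--                 return [], True
--             return [x], False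
--         mid = len(seq) // 2
--         lk, la = merge(seq[:mid])
--         rk, ra = merge(seq[mid:])
--         return lk + rk, la or ra
--
--     kept, any_stitch = merge(list(input_set))
--     if any_stitch:
--         kept.append('all_stitches')
--     return set(kept)
-- ===== Notes on version B (the rewrite author's own statement) =====
-- stated objective: alternative
-- what changed: Replaces A's single left-to-right pass with a mutable set and a threaded boolean flag by a divide-and-conquer recursion: the element list is split in halves, each call returns a (kept non-stitch elements, stitch-seen) pair, and results are combined by concatenation and disjunction, with the merged marker appended at the top level.
import Mathlib
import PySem

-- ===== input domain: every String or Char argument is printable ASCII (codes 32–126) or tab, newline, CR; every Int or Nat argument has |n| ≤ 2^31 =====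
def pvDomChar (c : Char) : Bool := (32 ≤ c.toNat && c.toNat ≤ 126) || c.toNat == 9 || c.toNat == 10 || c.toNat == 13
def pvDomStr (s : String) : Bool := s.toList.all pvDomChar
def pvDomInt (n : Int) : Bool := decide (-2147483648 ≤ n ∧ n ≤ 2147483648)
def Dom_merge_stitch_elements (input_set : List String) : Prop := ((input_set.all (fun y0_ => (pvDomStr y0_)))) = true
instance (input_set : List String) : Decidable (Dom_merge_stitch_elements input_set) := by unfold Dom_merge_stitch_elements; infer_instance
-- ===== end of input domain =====

-- B replaces A's single-pass flag-tracking loop by a divide-and-conquer recursion that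
-- splits the element list in halves and combines (kept, any_stitch) pairs (objective: alternative).

-- ===== PORT A =====
def merge_stitch_elements (input_set : List String) : List String :=
  let st := input_set.foldl
    (fun (acc : PySem.Set String × Bool) item =>
      if PySem.Str.startswith item "stitch_" then (acc.1, true)
      else (PySem.Set.add acc.1 item, acc.2))
    (PySem.Set.empty, false)
  if st.2 then PySem.Set.add st.1 "all_stitches" else st.1

-- ===== PORT B =====
-- inner helper 'merge(seq)': seq[:mid] / seq[mid:] with 0 ≤ mid ≤ len(seq) are exactly
-- List.take mid / List.drop mid; len(seq)//2 on a Nat length is exactly Nat division.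
def mergeHalves (seq : List String) : List String × Bool :=
  if _h0 : seq.length = 0 then ([], false)
  else if _h1 : seq.length = 1 then
    match seq with
    | x :: _ =>
      if PySem.Str.startswith x "stitch_" then ([], true) else ([x], false)
    | [] => ([], false)   -- unreachable (length = 1)
  else
    let mid := seq.length / 2
    let l := mergeHalves (seq.take mid)
    let r := mergeHalves (seq.drop mid)
    (l.1 ++ r.1, l.2 || r.2)
termination_by seq.length
decreasing_by
  · simp only [List.length_take]; omega
  · simp only [List.length_drop]; omega

def merge_stitch_elements_alt (input_set : List String) : List String :=
  let st := mergeHalves input_set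
  let kept := if st.2 then st.1 ++ ["all_stitches"] else st.1
  PySem.Set.ofList kept

-- ===== PRECONDITION & SPEC =====
def Spec_merge_stitch_elements (input_set : List String) (out : List String) : Prop := out = merge_stitch_elements_alt input_set
instance (input_set : List String) (out : List String) : Decidable (Spec_merge_stitch_elements input_set out) := by unfold Spec_merge_stitch_elements; infer_instance

-- ===== CLAIM (what is proved, stated in full; the proofs are below) =====
def Claim_equal_merge_stitch_elements : Prop := ∀ (input_set : List String), Dom_merge_stitch_elements input_set → Spec_merge_stitch_elements input_set (merge_stitch_elements input_set)

-- ===== LEMMAS AND PROOFS =====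
-- A's loop, for any starting accumulator: the kept elements are a fold of Set.add over the
-- non-stitch elements, and the flag is OR-ed with "some element has the prefix".
theorem foldA (p : String → Bool) (xs : List String) (s : PySem.Set String) (b : Bool) :
    xs.foldl
      (fun (acc : PySem.Set String × Bool) item =>
        if p item then (acc.1, true) else (PySem.Set.add acc.1 item, acc.2))
      (s, b)
    = ((xs.filter (fun x => !p x)).foldl PySem.Set.add s, b || xs.any p) := by
  induction xs generalizing s b with
  | nil => simp
  | cons x xs ih =>
    by_cases h : p x = true <;> simp [h, ih]

-- B's divide-and-conquer returns exactly (filtered non-stitch list, existence flag).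
theorem mergeHalves_eq (seq : List String) :
    mergeHalves seq
      = (seq.filter (fun x => !PySem.Str.startswith x "stitch_"),
         seq.any (fun x => PySem.Str.startswith x "stitch_")) := by
  suffices h : ∀ (n : ℕ) (l : List String), l.length = n →
      mergeHalves l
        = (l.filter (fun x => !PySem.Str.startswith x "stitch_"),
           l.any (fun x => PySem.Str.startswith x "stitch_")) from
    h seq.length seq rfl
  intro n
  induction n using Nat.strong_induction_on with
  | _ n ih =>
    intro l hlen
    rw [mergeHalves]
    by_cases h0 : l.length = 0
    · simp [List.length_eq_zero_iff.mp h0]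
    · by_cases h1 : l.length = 1
      · obtain ⟨x, hx⟩ := List.length_eq_one_iff.mp h1
        subst hx
        simp only [h1, dite_true]
        by_cases h : PySem.Chars.startswith x.toList ['s','t','i','t','c','h','_'] = true <;>
          simp [PySem.Str.startswith, show ("stitch_".toList) = ['s','t','i','t','c','h','_'] from rfl, h]
      · simp only [h0, h1, dite_false]
        have hmidlt : l.length / 2 < l.length := by omega
        have hmidpos : 0 < l.length / 2 := by omega
        rw [ih (l.take (l.length / 2)).length (by subst hlen; simp; omega) _ rfl,
            ih (l.drop (l.length / 2)).length (by subst hlen; simp; omega) _ rfl]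
        rw [← List.filter_append, ← List.any_append, List.take_append_drop]

-- ===== VERDICT (by name: the statement is the Claim_ definition above) =====
theorem merge_stitch_elements_spec : Claim_equal_merge_stitch_elements := by
  intro xs _
  unfold Spec_merge_stitch_elements merge_stitch_elements merge_stitch_elements_alt
  simp only [foldA, mergeHalves_eq, Bool.false_or, PySem.Set.empty]
  cases h : xs.any (fun x => PySem.Str.startswith x "stitch_") <;>
    simp [PySem.Set.ofList_eq_foldl]
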